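-- pv_equiv track=rewrite | github.com/pypi-data/pypi-mirror-404 | packages/yt-srt-gen/yt_srt_gen-0.1.2.tar.gz/yt_srt_gen-0.1.2/src/yt_srt_gen/cli.py | has_translation_block
-- ===== SOURCE A (Python) =====
-- def has_translation_block(lines):
--     """
--     Returns True if there are multiple subtitle lines
--     after the first timestamp.
--     """
--     after_timestamp = False
--     text_lines = 0
--
--     for line in lines:
--         stripped = line.strip()
--
--         if "-->" in stripped:
--             after_timestamp = True
--             continue
--
--         if after_timestamp:
--             if not stripped:
--                 break  # end of subtitle block
--
--             if not stripped.isdigit():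
--                 text_lines += 1
--
--             if text_lines > 1:
--                 return True  # already translated
--
--     return False
-- ===== SOURCE B (Python) =====
-- def has_translation_block(lines):
--     """
--     Returns True if there are multiple subtitle lines
--     after the first timestamp.
--     """
--     stripped = [line.strip() for line in lines]
--     for i, s in enumerate(stripped):
--         if "-->" in s:
--             break
--     else:
--         return False
--     block = stripped[i + 1:]
--     if "" in block:
--         block = block[:block.index("")]
--     count = sum(1 for s in block if not s.isdigit() and "-->" not in s)
--     return count > 1
-- ===== Notes on version B (the rewrite author's own statement) =====
-- stated objective: simpler
-- what changed: Replaced the stateful flag/counter/early-return scan with a locate-then-slice pipeline: strip all lines once, find the first timestamp line, cut the following slice at the first blank line, and count the non-digit non-timestamp lines in that block.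
import Mathlib
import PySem

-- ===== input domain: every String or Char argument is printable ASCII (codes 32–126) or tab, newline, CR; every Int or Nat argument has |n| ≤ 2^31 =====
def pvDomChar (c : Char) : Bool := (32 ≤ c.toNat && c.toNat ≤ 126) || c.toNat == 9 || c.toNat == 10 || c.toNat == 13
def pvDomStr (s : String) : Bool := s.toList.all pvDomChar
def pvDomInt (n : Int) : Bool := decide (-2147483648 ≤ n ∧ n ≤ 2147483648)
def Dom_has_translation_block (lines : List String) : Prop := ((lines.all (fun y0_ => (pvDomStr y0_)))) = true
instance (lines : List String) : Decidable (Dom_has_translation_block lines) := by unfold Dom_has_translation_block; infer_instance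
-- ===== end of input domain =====

-- B replaces A's stateful flag/counter scan with a locate-then-slice-then-count pipeline (same return value; no speed claim).


-- ===== PORT A =====
-- the for-loop over `lines` with state (after_timestamp, text_lines); `break`/`return` become immediate results
def pvGoA : List String → Bool → Int → Bool
  | [], _, _ => false
  | line :: rest, after_timestamp, text_lines =>
    let stripped := PySem.Str.strip line
    if PySem.Str.isIn "-->" stripped then pvGoA rest true text_lines
    else if after_timestamp then
      if stripped = "" then false          -- break: the final `return False`
      else
        let text_lines' := if !(PySem.Str.strIsdigit stripped) then text_lines + 1 else text_lines
        if text_lines' > 1 then true else pvGoA rest after_timestamp text_lines'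
    else pvGoA rest after_timestamp text_lines

def has_translation_block (lines : List String) : Bool := pvGoA lines false 0

-- ===== PORT B =====
-- the for/else search loop of Source B: index of the first stripped line containing "-->"
def pvFindTs : List String → Option Nat
  | [] => none
  | s :: rest => if PySem.Str.isIn "-->" s then some 0 else (pvFindTs rest).map (· + 1)

def has_translation_block_alt (lines : List String) : Bool :=
  let stripped := lines.map PySem.Str.strip
  match pvFindTs stripped with
  | none => false
  | some i =>
    let block := stripped.drop (i + 1)       -- stripped[i+1:] (nonnegative slice = drop)
    let block := match PySem.List.index? block "" with   -- if "" in block: block = block[:block.index("")]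
      | some j => block.take j
      | none => block
    let count := (block.filter (fun s => !(PySem.Str.strIsdigit s) && !(PySem.Str.isIn "-->" s))).length
    decide (1 < count)

-- ===== PRECONDITION & SPEC =====
def Spec_has_translation_block (lines : List String) (out : Bool) : Prop := out = has_translation_block_alt lines
instance (lines : List String) (out : Bool) : Decidable (Spec_has_translation_block lines out) := by unfold Spec_has_translation_block; infer_instance

-- ===== CLAIM (what is proved, stated in full; the proofs are below) =====
def Claim_equal_has_translation_block : Prop := ∀ (lines : List String), Dom_has_translation_block lines → Spec_has_translation_block lines (has_translation_block lines)

-- ===== LEMMAS AND PROOFS =====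

-- the count B takes, phrased with takeWhile
def pvC (ss : List String) : Nat :=
  ((ss.takeWhile (fun s => s != "")).filter (fun s => !(PySem.Str.strIsdigit s) && !(PySem.Str.isIn "-->" s))).length

theorem pvIsIn_ne_empty {s : String} (h : PySem.Str.isIn "-->" s = true) : s ≠ "" := by
  intro hs
  subst hs
  rw [PySem.Str.isIn_iff_infix] at h
  simp at h

theorem pvCut_eq_takeWhile (ss : List String) :
    (match PySem.List.index? ss "" with
      | some j => ss.take j
      | none => ss) = ss.takeWhile (fun s => s != "") := by
  induction ss with
  | nil => rfl
  | cons s rest ih =>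
    by_cases hs : s = ""
    · subst hs
      rw [PySem.List.index?_cons_self]
      simp only [List.takeWhile_cons, bne_self_eq_false, Bool.false_eq_true, if_false,
        List.take_zero]
    · rw [PySem.List.index?_cons_of_ne rest hs, List.takeWhile_cons,
        if_pos ((bne_iff_ne).mpr hs)]
      cases h : PySem.List.index? rest "" with
      | none =>
        rw [h] at ih
        simpa using congrArg (List.cons s) ih
      | some j =>
        rw [h] at ih
        simpa [List.take_succ_cons] using congrArg (List.cons s) ih

theorem pvC_cons_blank (ss : List String) : pvC ("" :: ss) = 0 := by
  unfold pvC
  simp only [List.takeWhile_cons, bne_self_eq_false, Bool.false_eq_true, if_false,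
    List.filter_nil, List.length_nil]

theorem pvC_cons_skip (s : String) (ss : List String) (hne : s ≠ "")
    (hp : (!(PySem.Str.strIsdigit s) && !(PySem.Str.isIn "-->" s)) = false) :
    pvC (s :: ss) = pvC ss := by
  unfold pvC
  rw [List.takeWhile_cons, if_pos ((bne_iff_ne).mpr hne)]
  simp only [List.filter_cons]
  rw [hp]
  simp only [Bool.false_eq_true, if_false]

theorem pvC_cons_text (s : String) (ss : List String) (hne : s ≠ "")
    (hp : (!(PySem.Str.strIsdigit s) && !(PySem.Str.isIn "-->" s)) = true) :
    pvC (s :: ss) = pvC ss + 1 := by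
  unfold pvC
  rw [List.takeWhile_cons, if_pos ((bne_iff_ne).mpr hne)]
  simp only [List.filter_cons]
  rw [hp]
  simp

-- phase 2 of A's loop (after the first timestamp) counts exactly B's block
theorem pvPhase2 (ls : List String) (cnt : Int) (h0 : 0 ≤ cnt) (h1 : cnt ≤ 1) :
    pvGoA ls true cnt = decide (1 < cnt + (pvC (ls.map PySem.Str.strip) : Int)) := by
  induction ls generalizing cnt with
  | nil =>
    simp only [pvGoA, List.map_nil]
    rw [eq_comm, decide_eq_false_iff_not]
    have h : pvC ([] : List String) = 0 := rfl
    rw [h]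
    push_cast
    omega
  | cons l rest ih =>
    simp only [pvGoA, List.map_cons]
    by_cases hts : PySem.Str.isIn "-->" (PySem.Str.strip l) = true
    · rw [if_pos hts, ih cnt h0 h1, decide_eq_decide,
        pvC_cons_skip _ _ (pvIsIn_ne_empty hts)
          (by simp only [hts, Bool.not_true, Bool.and_false])]
    · rw [if_neg hts]
      simp only [if_true]
      by_cases hbl : PySem.Str.strip l = ""
      · rw [if_pos hbl, eq_comm, decide_eq_false_iff_not, hbl, pvC_cons_blank]
        push_cast
        omega
      · rw [if_neg hbl]
        have hts' : PySem.Str.isIn "-->" (PySem.Str.strip l) = false := Bool.eq_false_iff.mpr hts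
        by_cases hd : PySem.Str.strIsdigit (PySem.Str.strip l) = true
        · have hif : (if !(PySem.Str.strIsdigit (PySem.Str.strip l)) then cnt + 1 else cnt) = cnt := by
            simp only [hd, Bool.not_true, Bool.false_eq_true, if_false]
          rw [hif, if_neg (by omega), ih cnt h0 h1, decide_eq_decide,
            pvC_cons_skip _ _ hbl (by simp only [hd, Bool.not_true, Bool.false_and])]
        · have hd' : PySem.Str.strIsdigit (PySem.Str.strip l) = false := Bool.eq_false_iff.mpr hd
          have hif : (if !(PySem.Str.strIsdigit (PySem.Str.strip l)) then cnt + 1 else cnt) = cnt + 1 := by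
            simp only [hd', Bool.not_false, if_true]
          rw [hif]
          have hC := pvC_cons_text (PySem.Str.strip l) (rest.map PySem.Str.strip) hbl
            (by simp only [hd', hts', Bool.not_false, Bool.and_self])
          by_cases hgt : cnt + 1 > 1
          · rw [if_pos hgt, eq_comm, decide_eq_true_iff, hC]
            push_cast
            omega
          · rw [if_neg hgt, ih (cnt + 1) (by omega) (by omega), decide_eq_decide, hC]
            push_cast
            omega

-- B rewritten through pvC
theorem pvAlt_eq (lines : List String) :
    has_translation_block_alt lines =
      match pvFindTs (lines.map PySem.Str.strip) with
      | none => false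
      | some i => decide (1 < (pvC ((lines.map PySem.Str.strip).drop (i + 1)) : Int)) := by
  unfold has_translation_block_alt
  cases h : pvFindTs (lines.map PySem.Str.strip) with
  | none => simp only [h]
  | some i =>
    simp only [h, pvCut_eq_takeWhile, decide_eq_decide]
    unfold pvC
    omega

-- the equivalence, free of the (unused) domain hypothesis
theorem pvMain (lines : List String) :
    pvGoA lines false 0 =
      match pvFindTs (lines.map PySem.Str.strip) with
      | none => false
      | some i => decide (1 < (pvC ((lines.map PySem.Str.strip).drop (i + 1)) : Int)) := by
  induction lines with
  | nil => rfl
  | cons l rest ih =>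
    simp only [List.map_cons, pvFindTs]
    by_cases hts : PySem.Str.isIn "-->" (PySem.Str.strip l) = true
    · simp only [pvGoA, if_pos hts, List.drop_succ_cons, List.drop_zero]
      rw [pvPhase2 rest 0 le_rfl (by norm_num), decide_eq_decide]
      omega
    · simp only [pvGoA, if_neg hts, Bool.false_eq_true, if_false]
      rw [ih]
      cases h : pvFindTs (rest.map PySem.Str.strip) with
      | none => simp only [Option.map_none]
      | some i =>
        simp only [Option.map_some, List.drop_succ_cons]
        rfl

-- ===== VERDICT (by name: the statement is the Claim_ definition above) =====
theorem has_translation_block_spec : Claim_equal_has_translation_block := by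
  intro lines _
  unfold Spec_has_translation_block has_translation_block
  rw [pvAlt_eq]
  exact pvMain lines
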